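-- pv_equiv track=rewrite | github.com/iiasa/COACCH | src/rest_helpers.py | _normalize_index_entry_case
-- ===== SOURCE A (Python) =====
-- def _normalize_index_entry_case(entry):
--     """Normalize the case of an index entry by lowercasing every word
--     other than all-uppercase words as these are presumably acronyms.
--     Words can be seperated by a space or dash. The normalized entry
--     is returned."""
--     ses = []
--     for se in entry.split(' '):
--         des = []
--         for de in se.split('-'):
--             if de == de.upper():
--                 # keep presumed acronym
--                 des.append(de)
--             else:
--                 des.append(de.lower())
--         ses.append('-'.join(des))
--     return ' '.join(ses)
-- ===== SOURCE B (Python) =====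
-- def _flush(cur):
--     w = ''.join(cur)
--     return w if w == w.upper() else w.lower()
--
--
-- def _normalize_index_entry_case(entry):
--     """Single linear pass over the characters: accumulate each word,
--     flush it (kept if all-uppercase, else lowercased) at every space or
--     dash separator, keeping the separators in place."""
--     out = []
--     cur = []
--     for ch in entry:
--         if ch in ' -':
--             out.append(_flush(cur))
--             out.append(ch)
--             cur = []
--         else:
--             cur.append(ch)
--     out.append(_flush(cur))
--     return ''.join(out)
-- ===== Notes on version B (the rewrite author's own statement) =====
-- stated objective: alternative
-- what changed: Replaces the nested split(' ')/split('-')/join passes by a single linear character scan that flushes each accumulated word at a separator and keeps separators in place.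
import Mathlib
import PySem

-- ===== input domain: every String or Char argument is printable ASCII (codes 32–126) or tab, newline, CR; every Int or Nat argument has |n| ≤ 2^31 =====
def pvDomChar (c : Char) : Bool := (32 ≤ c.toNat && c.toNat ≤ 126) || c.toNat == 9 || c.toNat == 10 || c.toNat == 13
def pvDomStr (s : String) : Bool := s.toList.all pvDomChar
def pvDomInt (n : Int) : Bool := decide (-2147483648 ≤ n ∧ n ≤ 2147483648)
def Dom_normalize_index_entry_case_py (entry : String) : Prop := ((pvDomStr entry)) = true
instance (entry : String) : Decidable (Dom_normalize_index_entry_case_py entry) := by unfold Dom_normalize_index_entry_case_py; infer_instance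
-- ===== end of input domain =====

-- B replaces A's nested split/join passes by one linear character scan (alternative decomposition, same cost).


-- ===== PORT A =====
-- entry.split(' '), inner split('-'), keep de if de == de.upper() else de.lower(), '-'.join, ' '.join
def normalize_index_entry_case_py (entry : String) : String :=
  String.mk (PySem.Chars.join [' ']
    ((PySem.Chars.splitOn entry.toList [' ']).map (fun se =>
      PySem.Chars.join ['-']
        ((PySem.Chars.splitOn se ['-']).map (fun de =>
          if de = PySem.Chars.upper de then de else PySem.Chars.lower de)))))

-- ===== PORT B =====
-- _flush(cur): the accumulated word, kept when equal to its uppercase form, else lowercased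
def pvFlush (cur : List Char) : List Char :=
  if cur = PySem.Chars.upper cur then cur else PySem.Chars.lower cur

-- the single pass of Source B: out is the returned prefix, cur the word accumulated so far
def pvGoB (cur : List Char) : List Char → List Char
  | [] => pvFlush cur
  | c :: rest =>
    if c = ' ' ∨ c = '-' then pvFlush cur ++ c :: pvGoB [] rest
    else pvGoB (cur ++ [c]) rest

def normalize_index_entry_case_py_alt (entry : String) : String :=
  String.mk (pvGoB [] entry.toList)

-- ===== PRECONDITION & SPEC =====
def Spec_normalize_index_entry_case_py (entry : String) (out : String) : Prop := out = normalize_index_entry_case_py_alt entry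
instance (entry : String) (out : String) : Decidable (Spec_normalize_index_entry_case_py entry out) := by unfold Spec_normalize_index_entry_case_py; infer_instance

-- ===== CLAIM (what is proved, stated in full; the proofs are below) =====
def Claim_equal_normalize_index_entry_case_py : Prop := ∀ (entry : String), Dom_normalize_index_entry_case_py entry → Spec_normalize_index_entry_case_py entry (normalize_index_entry_case_py entry)

-- ===== LEMMAS AND PROOFS =====

-- prepend pre to the first piece (the empty piece list never arises from a split)
def pvConsHead (pre : List Char) : List (List Char) → List (List Char)
  | [] => [pre]
  | h :: t => (pre ++ h) :: t

-- structural-recursion characterisation of Python's split on a single-character separator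
def pvSplit (c : Char) : List Char → List (List Char)
  | [] => [[]]
  | x :: xs => if x = c then [] :: pvSplit c xs else pvConsHead [x] (pvSplit c xs)

lemma pvConsHead_ne_nil (pre : List Char) (s : List (List Char)) : pvConsHead pre s ≠ [] := by
  cases s <;> simp [pvConsHead]

lemma pvSplit_ne_nil (c : Char) (l : List Char) : pvSplit c l ≠ [] := by
  cases l with
  | nil => simp [pvSplit]
  | cons x xs =>
    simp only [pvSplit]
    split
    · simp
    · exact pvConsHead_ne_nil _ _

lemma pvConsHead_nil (s : List (List Char)) (h : s ≠ []) : pvConsHead [] s = s := by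
  cases s with
  | nil => exact absurd rfl h
  | cons a t => simp [pvConsHead]

lemma pvConsHead_consHead (p q : List Char) (s : List (List Char)) :
    pvConsHead p (pvConsHead q s) = pvConsHead (p ++ q) s := by
  cases s <;> simp [pvConsHead]

lemma pvGo_eq (c : Char) (fuel : Nat) : ∀ (l cur : List Char) (acc : List (List Char)),
    l.length < fuel →
    PySem.Chars.splitOn.go [c] fuel l cur acc = acc.reverse ++ pvConsHead cur.reverse (pvSplit c l) := by
  induction fuel with
  | zero => intro l cur acc h; omega
  | succ n ih =>
    intro l cur acc h
    cases l with
    | nil => simp [PySem.Chars.splitOn.go, pvSplit, pvConsHead]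
    | cons x rest =>
      by_cases hx : x = c
      · subst hx
        have hpre : List.isPrefixOf [x] (x :: rest) = true := by simp [List.isPrefixOf]
        simp only [PySem.Chars.splitOn.go, hpre, if_true, List.length_cons, List.drop_succ_cons, List.length_nil, List.drop_zero]
        rw [ih rest [] (cur.reverse :: acc) (by simpa using Nat.lt_of_succ_lt_succ h)]
        have hs := pvSplit_ne_nil x rest
        simp only [pvSplit, if_true]
        cases hsp : pvSplit x rest with
        | nil => exact absurd hsp hs
        | cons a t => simp [pvConsHead]
      · have hpre : List.isPrefixOf [c] (x :: rest) = false := by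
          simp [List.isPrefixOf]
          exact fun h' => absurd h'.symm hx
        simp only [PySem.Chars.splitOn.go, hpre, Bool.false_eq_true, if_false]
        rw [ih rest (x :: cur) acc (by simpa using Nat.lt_of_succ_lt_succ h)]
        simp [pvSplit, hx, pvConsHead_consHead]

lemma pvSplitOn_single (c : Char) (l : List Char) :
    PySem.Chars.splitOn l [c] = pvSplit c l := by
  unfold PySem.Chars.splitOn
  rw [pvGo_eq c (l.length + 1) l [] [] (by omega)]
  simp [pvConsHead_nil _ (pvSplit_ne_nil c l)]

lemma pvSplit_of_not_mem (c : Char) (l : List Char) (h : c ∉ l) : pvSplit c l = [l] := by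
  induction l with
  | nil => simp [pvSplit]
  | cons x xs ih =>
    have hx : x ≠ c := fun he => h (by simp [he])
    rw [pvSplit, if_neg hx, ih (fun hm => h (List.mem_cons_of_mem _ hm))]
    simp [pvConsHead]

lemma pvSplit_append (c : Char) (pre rest : List Char) (h : c ∉ pre) :
    pvSplit c (pre ++ rest) = pvConsHead pre (pvSplit c rest) := by
  induction pre with
  | nil => simp [pvConsHead_nil _ (pvSplit_ne_nil c rest)]
  | cons x xs ih =>
    have hx : x ≠ c := fun he => h (by simp [he])
    rw [List.cons_append, pvSplit, if_neg hx, ih (fun hm => h (List.mem_cons_of_mem _ hm)),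
      pvConsHead_consHead]
    rfl

-- A's whole computation, expressed over pvSplit
def pvGA (l : List Char) : List Char :=
  PySem.Chars.join [' ']
    ((pvSplit ' ' l).map (fun se =>
      PySem.Chars.join ['-'] ((pvSplit '-' se).map pvFlush)))

-- A's inner word computation on a dash-free word is pvFlush
lemma pvInner_of_no_dash (w : List Char) (h : '-' ∉ w) :
    PySem.Chars.join ['-'] ((pvSplit '-' w).map pvFlush) = pvFlush w := by
  rw [pvSplit_of_not_mem _ _ h]
  simp [PySem.Chars.join_singleton]

lemma pvSplit_cons_self (c : Char) (xs : List Char) : pvSplit c (c :: xs) = [] :: pvSplit c xs := by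
  simp [pvSplit]

lemma pvGA_space (cur rest : List Char) (hs : ' ' ∉ cur) (hd : '-' ∉ cur) :
    pvGA (cur ++ ' ' :: rest) = pvFlush cur ++ ' ' :: pvGA rest := by
  rw [pvGA, pvSplit_append ' ' cur (' ' :: rest) hs, pvSplit_cons_self]
  cases hsp : pvSplit ' ' rest with
  | nil => exact absurd hsp (pvSplit_ne_nil _ _)
  | cons h t =>
    simp only [pvConsHead, List.append_nil, List.map_cons, PySem.Chars.join_cons_cons,
      pvInner_of_no_dash cur hd, pvGA, hsp]
    simp

lemma pvGA_dash (cur rest : List Char) (hs : ' ' ∉ cur) (hd : '-' ∉ cur) :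
    pvGA (cur ++ '-' :: rest) = pvFlush cur ++ '-' :: pvGA rest := by
  rw [pvGA, show cur ++ '-' :: rest = (cur ++ ['-']) ++ rest by simp,
    pvSplit_append ' ' (cur ++ ['-']) rest (by simp [hs])]
  cases hsp : pvSplit ' ' rest with
  | nil => exact absurd hsp (pvSplit_ne_nil _ _)
  | cons h t =>
    have hin : PySem.Chars.join ['-'] ((pvSplit '-' ((cur ++ ['-']) ++ h)).map pvFlush)
        = pvFlush cur ++ '-' :: PySem.Chars.join ['-'] ((pvSplit '-' h).map pvFlush) := by
      rw [show (cur ++ ['-']) ++ h = cur ++ '-' :: h by simp, pvSplit_append '-' cur _ hd,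
        pvSplit_cons_self]
      cases hsp2 : pvSplit '-' h with
      | nil => exact absurd hsp2 (pvSplit_ne_nil _ _)
      | cons h2 t2 =>
        simp [pvConsHead, PySem.Chars.join_cons_cons]
    cases t with
    | nil =>
      simp only [pvConsHead, List.map_singleton, PySem.Chars.join_singleton, hin, pvGA, hsp]
    | cons h3 t3 =>
      simp only [pvConsHead, List.map_cons, PySem.Chars.join_cons_cons, hin, pvGA, hsp]
      simp

lemma pvGoB_eq_pvGA (l : List Char) : ∀ (cur : List Char), ' ' ∉ cur → '-' ∉ cur →
    pvGoB cur l = pvGA (cur ++ l) := by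
  induction l with
  | nil =>
    intro cur hs hd
    rw [List.append_nil, pvGoB, pvGA, pvSplit_of_not_mem _ _ hs, List.map_singleton,
      pvInner_of_no_dash _ hd, PySem.Chars.join_singleton]
  | cons x rest ih =>
    intro cur hs hd
    by_cases hx : x = ' ' ∨ x = '-'
    · rw [pvGoB, if_pos hx, ih [] (by simp) (by simp)]
      rcases hx with hx | hx <;> subst hx
      · exact (pvGA_space cur rest hs hd).symm
      · exact (pvGA_dash cur rest hs hd).symm
    · push Not at hx
      rw [pvGoB, if_neg (by tauto), ih (cur ++ [x]) (by simp [hs]; exact fun he => hx.1 he.symm)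
        (by simp [hd]; exact fun he => hx.2 he.symm)]
      simp

-- ===== VERDICT (by name: the statement is the Claim_ definition above) =====
theorem normalize_index_entry_case_py_spec : Claim_equal_normalize_index_entry_case_py := by
  intro entry _
  unfold Spec_normalize_index_entry_case_py normalize_index_entry_case_py
    normalize_index_entry_case_py_alt
  rw [pvGoB_eq_pvGA entry.toList [] (by simp) (by simp), List.nil_append]
  simp only [pvGA, pvSplitOn_single]
  rfl
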